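-- pv_equiv track=rewrite | github.com/mwboiss/DSI-Prep | intro_py/string_count.py | rep_chars
-- ===== SOURCE A (Python) =====
-- def rep_chars(string):
--     lower_str = string.lower()
--     letters_seen = []
--     result = []
--     for char in lower_str:
--         char_count = lower_str.count(char)
--         if char_count > 1 and not char.isspace() and char not in letters_seen:
--             result.append(char*char_count)
--             letters_seen.append(char)
--
--     return result
-- ===== SOURCE B (Python) =====
-- def rep_chars(string):
--     counts = {}
--     for ch in string.lower():
--         counts[ch] = counts.get(ch, 0) + 1
--     return [ch * n for ch, n in counts.items() if n > 1 and not ch.isspace()]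
-- ===== Notes on version B (the rewrite author's own statement) =====
-- stated objective: faster
-- what changed: Replaces the per-character full-string .count scans and the explicit letters_seen dedup list with one counting pass building an insertion-ordered frequency dict, then a single pass over the distinct characters emitting char*n for n>1 non-space entries.
import Mathlib
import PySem

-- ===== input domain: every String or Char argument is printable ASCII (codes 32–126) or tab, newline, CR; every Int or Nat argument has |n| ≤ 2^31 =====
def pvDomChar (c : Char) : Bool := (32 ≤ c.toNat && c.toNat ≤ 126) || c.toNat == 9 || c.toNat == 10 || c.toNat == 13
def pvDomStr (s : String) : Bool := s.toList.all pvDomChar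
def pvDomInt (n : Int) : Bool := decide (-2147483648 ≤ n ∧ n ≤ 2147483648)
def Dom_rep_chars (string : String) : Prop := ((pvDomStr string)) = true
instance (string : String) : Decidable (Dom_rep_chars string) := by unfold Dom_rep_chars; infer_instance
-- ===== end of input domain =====

-- B replaces A's repeated full-string count scans and seen-list with one frequency-dict pass
-- followed by a pass over the distinct characters (faster in a timing run: O(n) vs O(n^2)).

-- ===== PORT A =====
def rep_chars (string : String) : List String :=
  let l := (PySem.Str.lower string).toList
  (l.foldl (fun (st : List Char × List String) c =>
      let cnt := l.count c
      if cnt > 1 ∧ ¬ (PySem.Chars.isspace c = true) ∧ c ∉ st.1 then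
        (st.1 ++ [c], st.2 ++ [String.mk (List.replicate cnt c)])
      else st) ([], [])).2

-- ===== PORT B =====
def rep_chars_alt (string : String) : List String :=
  let l := (PySem.Str.lower string).toList
  let counts : PySem.Dict Char Int :=
    l.foldl (fun d c => d.insert c (d.getD c 0 + 1)) PySem.Dict.empty
  counts.items.filterMap (fun p =>
    if p.2 > 1 ∧ ¬ (PySem.Chars.isspace p.1 = true) then
      some (String.mk (List.replicate p.2.toNat p.1))
    else none)

-- ===== PRECONDITION & SPEC =====
def Spec_rep_chars (string : String) (out : List String) : Prop := out = rep_chars_alt string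
instance (string : String) (out : List String) : Decidable (Spec_rep_chars string out) := by unfold Spec_rep_chars; infer_instance

-- ===== CLAIM (what is proved, stated in full; the proofs are below) =====
def Claim_equal_rep_chars : Prop := ∀ (string : String), Dom_rep_chars string → Spec_rep_chars string (rep_chars string)

-- ===== LEMMAS AND PROOFS =====

-- first occurrences of l that are not in seen, extending seen as we go
def pvFirsts (seen : List Char) : List Char → List Char
  | [] => []
  | c :: t => if c ∈ seen then pvFirsts seen t else c :: pvFirsts (seen ++ [c]) t

-- the per-distinct-character emission both programs perform, relative to the full list L
def pvF (L : List Char) (c : Char) : Option String :=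
  if L.count c > 1 ∧ ¬ (PySem.Chars.isspace c = true) then
    some (String.mk (List.replicate (L.count c) c))
  else none

theorem pvFirsts_congr : ∀ (l s1 s2 : List Char), (∀ x, x ∈ s1 ↔ x ∈ s2) →
    pvFirsts s1 l = pvFirsts s2 l := by
  intro l
  induction l with
  | nil => intro _ _ _; rfl
  | cons c t ih =>
      intro s1 s2 h
      simp only [pvFirsts]
      by_cases hc : c ∈ s1
      · rw [if_pos hc, if_pos ((h c).mp hc)]
        exact ih s1 s2 h
      · rw [if_neg hc, if_neg (fun hx => hc ((h c).mpr hx))]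
        refine congrArg _ (ih _ _ ?_)
        intro x; simp [h x]

theorem pvFirsts_filterMap_none (f : Char → Option String) (c : Char) (hc : f c = none) :
    ∀ (l seen : List Char),
      (pvFirsts (seen ++ [c]) l).filterMap f = (pvFirsts seen l).filterMap f := by
  intro l
  induction l with
  | nil => intro _; rfl
  | cons d t ih =>
      intro seen
      by_cases hdc : d = c
      · subst hdc
        simp only [pvFirsts]
        rw [if_pos (by simp)]
        by_cases hd : d ∈ seen
        · rw [if_pos hd]
          have : pvFirsts (seen ++ [d]) t = pvFirsts seen t :=
            pvFirsts_congr t _ _ (by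
              intro x; simp only [List.mem_append, List.mem_singleton]
              constructor
              · rintro (h | rfl); exacts [h, hd]
              · exact Or.inl)
          rw [this]
        · rw [if_neg hd]
          simp [hc]
      · simp only [pvFirsts]
        by_cases hd : d ∈ seen
        · rw [if_pos (by simp [hd]), if_pos hd]
          exact ih seen
        · rw [if_neg (by simp [hd, hdc]), if_neg hd]
          simp only [List.filterMap_cons]
          have hcomm : pvFirsts ((seen ++ [c]) ++ [d]) t = pvFirsts ((seen ++ [d]) ++ [c]) t :=
            pvFirsts_congr t _ _ (by intro x; simp; tauto)
          rw [hcomm, ih (seen ++ [d])]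

theorem foldl_add_eq_pvFirsts : ∀ (l s : List Char),
    List.foldl PySem.Set.add s l = s ++ pvFirsts s l := by
  intro l
  induction l with
  | nil => intro s; simp [pvFirsts]
  | cons c t ih =>
      intro s
      simp only [List.foldl_cons, pvFirsts]
      by_cases hc : c ∈ s
      · rw [if_pos hc]
        have : PySem.Set.add s c = s := by
          simp [PySem.Set.add, PySem.Set.contains, hc]
        rw [this, ih]
      · rw [if_neg hc]
        have : PySem.Set.add s c = s ++ [c] := by
          simp [PySem.Set.add, PySem.Set.contains, hc]
        rw [this, ih]
        simp

theorem foldA (L : List Char) : ∀ (l seen : List Char) (res : List String),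
    (l.foldl (fun (st : List Char × List String) c =>
        let cnt := L.count c
        if cnt > 1 ∧ ¬ (PySem.Chars.isspace c = true) ∧ c ∉ st.1 then
          (st.1 ++ [c], st.2 ++ [String.mk (List.replicate cnt c)])
        else st) (seen, res)).2
      = res ++ (pvFirsts seen l).filterMap (pvF L) := by
  intro l
  induction l with
  | nil => intro seen res; simp [pvFirsts]
  | cons c t ih =>
      intro seen res
      simp only [List.foldl_cons, pvFirsts]
      by_cases hmem : c ∈ seen
      · rw [if_neg (by tauto), if_pos hmem]
        exact ih seen res
      · by_cases hpass : L.count c > 1 ∧ ¬ (PySem.Chars.isspace c = true)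
        · rw [if_pos ⟨hpass.1, hpass.2, hmem⟩, if_neg hmem]
          rw [ih (seen ++ [c]) (res ++ [String.mk (List.replicate (L.count c) c)])]
          simp [pvF, hpass]
        · rw [if_neg (by tauto), if_neg hmem]
          rw [ih seen res]
          have hnone : pvF L c = none := by
            simp only [pvF]; rw [if_neg hpass]
          rw [List.filterMap_cons, hnone]
          rw [pvFirsts_filterMap_none (pvF L) c hnone t seen]

theorem altB (string : String) :
    rep_chars_alt string
      = (pvFirsts [] (PySem.Str.lower string).toList).filterMap
          (pvF (PySem.Str.lower string).toList) := by
  unfold rep_chars_alt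
  set l := (PySem.Str.lower string).toList with hl
  simp only []
  rw [PySem.Dict.foldl_insert_getD_add_one_eq_counter, PySem.Dict.items_counter,
      List.filterMap_map]
  have hset : PySem.Set.ofList l = pvFirsts [] l := by
    rw [PySem.Set.ofList_eq_foldl, foldl_add_eq_pvFirsts]
    simp
  rw [hset]
  refine List.filterMap_congr ?_
  intro c _
  simp only [Function.comp, pvF]
  by_cases hpass : l.count c > 1 ∧ ¬ (PySem.Chars.isspace c = true)
  · rw [if_pos (⟨by exact_mod_cast hpass.1, hpass.2⟩ :
        ((l.count c : Int) > 1) ∧ ¬ (PySem.Chars.isspace c = true)), if_pos hpass]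
    simp
  · rw [if_neg (by intro h; exact hpass ⟨by exact_mod_cast h.1, h.2⟩), if_neg hpass]

-- ===== VERDICT (by name: the statement is the Claim_ definition above) =====
theorem rep_chars_spec : Claim_equal_rep_chars := by
  intro string _
  unfold Spec_rep_chars rep_chars
  rw [altB]
  exact foldA _ _ [] []
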